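-- pv_equiv track=rewrite | github.com/mfx2/CS1110 | Labs/lab12/lab12.py | num_space_runs
-- ===== SOURCE A (Python) =====
-- def num_space_runs(s):
--     """Returns: The number of runs of spaces in the string s.
--
--     A run is a collection of adjacent spaces.  We need a non-space character
--     in-between to break up runs.
--
--     Example: num_space_runs('  a  f   g    ') returns 4
--              num_space_runs('a  f   g') returns 2
--              num_space_runs('  a  bc   d') returns 3
--
--     Parameter s: The string to parse
--     Precondition: s is a nonempty string with letters and spaces"""
--     # PUT THE INITIALIZATION CODE HERE
--     spaces = 0
--     k = 0
--     # invariant: s[0..i] contains n runs of spaces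
--     # PUT THE WHILE LOOP HERE
--     while k < len(s):
--         if k !=0:
--             if s[k]==' ':
--                 if s[k] == s[k-1]:
--                     k = k+1
--                 else:
--                     spaces = spaces + 1
--                     k = k + 1
--             else:
--                 k = k + 1
--         if k == 0:
--             if s[k]==' ':
--                 spaces = spaces + 1
--                 k = k + 1
--             else:
--                 k = k + 1
--
--     # post: s[0..len(s)-1] contains n runs of spaces
--     # PUT THE RETURN STATEMENT HERE
--     return spaces
-- ===== SOURCE B (Python) =====
-- def num_space_runs(s):
--     spaces = sum(c == ' ' for c in s)
--     pairs = sum(a == ' ' and b == ' ' for a, b in zip(s, s[1:]))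
--     return spaces - pairs
-- ===== Notes on version B (the rewrite author's own statement) =====
-- stated objective: alternative
-- what changed: Replaced the stateful index walk with an arithmetic identity: each run of L spaces contains L spaces and L-1 adjacent space pairs, so the number of runs equals (count of spaces) minus (count of adjacent space pairs), computed by two independent counts.
import Mathlib
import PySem

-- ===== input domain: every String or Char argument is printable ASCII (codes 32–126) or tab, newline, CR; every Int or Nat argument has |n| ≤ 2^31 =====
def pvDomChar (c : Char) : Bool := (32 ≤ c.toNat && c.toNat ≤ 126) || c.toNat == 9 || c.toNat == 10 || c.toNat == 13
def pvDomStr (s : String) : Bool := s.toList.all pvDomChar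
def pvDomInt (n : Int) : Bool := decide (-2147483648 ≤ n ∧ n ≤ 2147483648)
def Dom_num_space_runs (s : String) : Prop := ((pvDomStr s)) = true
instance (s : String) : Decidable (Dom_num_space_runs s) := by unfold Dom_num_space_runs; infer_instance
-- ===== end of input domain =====

-- B replaces A's stateful index walk by an arithmetic identity: a run of L spaces has L spaces
-- and L-1 adjacent space pairs, so runs = #spaces - #adjacent-space-pairs (alternative; same cost).

-- ===== PORT A =====
-- A's while loop over index k; spaces is the accumulator.  In A the two top-level ifs run
-- sequentially, but the first always sets k to a nonzero value, so the second fires exactly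
-- when k was 0 at the start of the iteration; the branches below reflect that.
def numSpaceRunsLoopA (cs : List Char) (k : Nat) (spaces : Int) : Int :=
  if _h : k < cs.length then
    if k ≠ 0 then
      if cs[k]! = ' ' then
        if cs[k]! = cs[k-1]! then numSpaceRunsLoopA cs (k+1) spaces
        else numSpaceRunsLoopA cs (k+1) (spaces+1)
      else numSpaceRunsLoopA cs (k+1) spaces
    else
      if cs[k]! = ' ' then numSpaceRunsLoopA cs (k+1) (spaces+1)
      else numSpaceRunsLoopA cs (k+1) spaces
  else spaces
termination_by cs.length - k

def num_space_runs (s : String) : Int :=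
  numSpaceRunsLoopA s.toList 0 0

-- ===== PORT B =====
-- spaces = sum(c == ' ' for c in s);  pairs = sum(a == ' ' and b == ' ' for a, b in zip(s, s[1:]))
def num_space_runs_alt (s : String) : Int :=
  let cs := s.toList
  let spaces := cs.foldl (fun acc c => acc + (if c = ' ' then (1 : Int) else 0)) 0
  let pairs := (cs.zip (PySem.List.slice cs (some 1) none)).foldl
      (fun acc p => acc + (if p.1 = ' ' ∧ p.2 = ' ' then (1 : Int) else 0)) 0
  spaces - pairs

-- ===== PRECONDITION & SPEC =====
def Spec_num_space_runs (s : String) (out : Int) : Prop := out = num_space_runs_alt s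
instance (s : String) (out : Int) : Decidable (Spec_num_space_runs s out) := by unfold Spec_num_space_runs; infer_instance

-- ===== CLAIM (what is proved, stated in full; the proofs are below) =====
def Claim_equal_num_space_runs : Prop := ∀ (s : String), Dom_num_space_runs s → Spec_num_space_runs s (num_space_runs s)

-- ===== LEMMAS AND PROOFS =====

-- characterisation of A: scan with the previous character, counting run starts
def nsrScan (prev : Char) : List Char → Int
  | [] => 0
  | c :: cs => (if c = ' ' ∧ prev ≠ ' ' then 1 else 0) + nsrScan c cs

-- number of spaces
def nsrS : List Char → Int
  | [] => 0
  | c :: cs => (if c = ' ' then 1 else 0) + nsrS cs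

-- number of adjacent space pairs in prev :: cs
def nsrP (prev : Char) : List Char → Int
  | [] => 0
  | c :: cs => (if prev = ' ' ∧ c = ' ' then 1 else 0) + nsrP c cs

theorem loopA_eq_scan (cs : List Char) (k : Nat) (spaces : Int) (hk : 1 ≤ k) :
    numSpaceRunsLoopA cs k spaces = spaces + nsrScan (cs[k-1]!) (cs.drop k) := by
  generalize hn : cs.length - k = n
  induction n generalizing k spaces with
  | zero =>
    rw [numSpaceRunsLoopA]
    have hlen : ¬ (k < cs.length) := by omega
    simp [hlen, List.drop_eq_nil_of_le (by omega : cs.length ≤ k), nsrScan]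
  | succ n ihn =>
    have hklt : k < cs.length := by omega
    have hdrop : cs.drop k = cs[k]! :: cs.drop (k+1) := by
      rw [List.drop_eq_getElem_cons hklt]
      congr 1
      exact (getElem!_pos cs k hklt).symm
    have hprev : cs[(k+1)-1]! = cs[k]! := by norm_num
    rw [numSpaceRunsLoopA]
    have hk0 : k ≠ 0 := by omega
    simp only [dif_pos hklt, if_pos hk0, hdrop, nsrScan]
    by_cases hsp : cs[k]! = ' '
    · by_cases heq : cs[k]! = cs[k-1]!
      · have hcond : ¬ (cs[k]! = ' ' ∧ cs[k-1]! ≠ ' ') := by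
          rw [← heq]; tauto
        rw [if_pos hsp, if_pos heq,
          ihn (k+1) spaces (by omega) (by omega), hprev, if_neg hcond]
        ring
      · have hcond : (cs[k]! = ' ' ∧ cs[k-1]! ≠ ' ') := by
          constructor
          · exact hsp
          · intro h; exact heq (by rw [hsp, h])
        rw [if_pos hsp, if_neg heq,
          ihn (k+1) (spaces+1) (by omega) (by omega), hprev, if_pos hcond]
        ring
    · have hcond : ¬ (cs[k]! = ' ' ∧ cs[k-1]! ≠ ' ') := by tauto
      rw [if_neg hsp, ihn (k+1) spaces (by omega) (by omega), hprev, if_neg hcond]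
      ring

-- the arithmetic identity: run starts = spaces − adjacent space pairs
theorem scan_eq_S_sub_P (cs : List Char) : ∀ prev, nsrScan prev cs = nsrS cs - nsrP prev cs := by
  induction cs with
  | nil => intro prev; simp [nsrScan, nsrS, nsrP]
  | cons c cs ih =>
    intro prev
    simp only [nsrScan, nsrS, nsrP, ih c]
    by_cases hc : c = ' ' <;> by_cases hp : prev = ' ' <;> (simp [hc, hp]; try ring)

theorem foldl_spaces (cs : List Char) : ∀ acc : Int,
    cs.foldl (fun acc c => acc + (if c = ' ' then (1 : Int) else 0)) acc = acc + nsrS cs := by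
  induction cs with
  | nil => intro acc; simp [nsrS]
  | cons c cs ih =>
    intro acc
    simp only [List.foldl, nsrS, ih]
    ring

theorem foldl_pairs (cs : List Char) : ∀ (c : Char) (acc : Int),
    ((c :: cs).zip cs).foldl
      (fun acc p => acc + (if p.1 = ' ' ∧ p.2 = ' ' then (1 : Int) else 0)) acc
      = acc + nsrP c cs := by
  induction cs with
  | nil => intro c acc; simp [nsrP]
  | cons d ds ih =>
    intro c acc
    simp only [List.zip_cons_cons, List.foldl, nsrP, ih]
    ring

theorem ports_agree (s : String) : num_space_runs s = num_space_runs_alt s := by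
  unfold num_space_runs num_space_runs_alt
  simp only [PySem.List.slice_from_one]
  cases hcs : s.toList with
  | nil => rw [numSpaceRunsLoopA]; simp
  | cons c cs =>
    have h0 : (c :: cs)[0]! = c := rfl
    rw [numSpaceRunsLoopA]
    have hlt : 0 < (c :: cs).length := by simp
    simp only [dif_pos hlt, if_neg (by simp : ¬ (0 : Nat) ≠ 0), h0, List.tail_cons]
    have hfp := foldl_pairs cs c 0
    have hfs := foldl_spaces (c :: cs) 0
    simp only [zero_add] at hfp hfs
    rw [hfp, hfs]
    by_cases hc : c = ' '
    · rw [if_pos hc, show (0:Nat)+1 = 1 from rfl, show (0:Int)+1 = 1 from rfl,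
        loopA_eq_scan (c :: cs) 1 1 (by omega)]
      simp only [List.drop_one, List.tail_cons, show (1:Nat) - 1 = 0 from rfl, h0,
        scan_eq_S_sub_P cs c, nsrS, if_pos hc]
      ring
    · rw [if_neg hc, show (0:Nat)+1 = 1 from rfl,
        loopA_eq_scan (c :: cs) 1 0 (by omega)]
      simp only [List.drop_one, List.tail_cons, show (1:Nat) - 1 = 0 from rfl, h0,
        scan_eq_S_sub_P cs c, nsrS, if_neg hc]
      ring

-- ===== VERDICT (by name: the statement is the Claim_ definition above) =====
theorem num_space_runs_spec : Claim_equal_num_space_runs := by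
  intro s _
  unfold Spec_num_space_runs
  exact ports_agree s
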